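-- pv_equiv track=rewrite | github.com/penn-cnt/stim-seizures-manuscript | code/utils.py | surgical_parcelate
-- ===== SOURCE A (Python) =====
-- def surgical_parcelate(region_list):
--     """
--     Convert a list of anatomical region labels to surgical region categories.
--
--     This function applies the same surgical parcellation logic as surgical_parcellation()
--     but operates on a simple list of region names rather than a full DataFrame.
--
--     Args:
--         region_list (list): List of anatomical region label strings
--
--     Returns:
--         list: List of corresponding surgical region labels
--
--     See surgical_parcellation() for detailed mapping rules.
--
--     Notes:
--         - Functional equivalent to surgical_parcellation() for list inputs
--         - Useful when you only need to convert labels without electrode coordinates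
--         - Handles the same edge cases (NaN values, case sensitivity)
--     """
--     surgical_labels = []
--     for label in region_list:
--         if isinstance(label,float):
--             label = "EmptyLabel"
--         label = label.lower()
--         if ("emptylabel" in label) or ("white" in label):
--             surgical_label = "EmptyLabel"
--         elif ("amygdala" in label) or ("hippocampus" in label):
--             if "left" in label:
--                 surgical_label = 'left mesial temporal'
--             else:
--                 surgical_label = 'right mesial temporal'
--         elif ("temporal" in label) or ("fusiform" in label) or ("entorhinal" in label) or ("parahippocampal" in label):
--             if "left" in label:
--                 surgical_label = 'left temporal neocortex'
--             else:
--                 surgical_label = 'right temporal neocortex'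
--         else:
--             if "left" in label:
--                 surgical_label = 'left other neocortex'
--             else:
--                 surgical_label = 'right other neocortex'
--         surgical_labels.append(surgical_label)
--     return surgical_labels
-- ===== SOURCE B (Python) =====
-- _RULES = [
--     (("emptylabel", "white"), "EmptyLabel"),
--     (("amygdala", "hippocampus"), "mesial temporal"),
--     (("temporal", "fusiform", "entorhinal", "parahippocampal"), "temporal neocortex"),
-- ]
--
-- def _base_category(low):
--     for keywords, category in _RULES:
--         if any(k in low for k in keywords):
--             return category
--     return "other neocortex"
--
-- def surgical_parcelate(region_list):
--     out = []
--     for label in region_list: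
--         if isinstance(label, float):
--             label = "EmptyLabel"
--         low = label.lower()
--         base = _base_category(low)
--         if base == "EmptyLabel":
--             out.append(base)
--         else:
--             out.append(("left " if "left" in low else "right ") + base)
--     return out
-- ===== Notes on version B (the rewrite author's own statement) =====
-- stated objective: simpler
-- what changed: Replaces the nested if/elif tree with four duplicated laterality branches by a data-driven scan over an ordered (keywords, base-category) rule table plus one shared left/right combining step.
import Mathlib
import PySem

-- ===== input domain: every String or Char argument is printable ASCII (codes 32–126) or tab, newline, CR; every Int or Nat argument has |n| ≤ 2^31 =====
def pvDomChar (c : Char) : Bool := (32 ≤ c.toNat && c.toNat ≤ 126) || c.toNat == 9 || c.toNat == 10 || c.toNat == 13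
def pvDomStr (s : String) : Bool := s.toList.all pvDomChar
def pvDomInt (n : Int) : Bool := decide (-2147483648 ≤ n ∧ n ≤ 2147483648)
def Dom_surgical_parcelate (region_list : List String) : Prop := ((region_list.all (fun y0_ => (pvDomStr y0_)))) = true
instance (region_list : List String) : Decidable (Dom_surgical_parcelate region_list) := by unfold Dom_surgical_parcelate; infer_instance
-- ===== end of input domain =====

-- B replaces A's nested if/elif tree (laterality test duplicated in three branches) by an
-- ordered (keywords, base-category) rule-table scan plus one shared left/right combining step.
-- The Python isinstance(label, float) branch is unreachable for List String inputs and is not ported.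

-- ===== PORT A =====
def surgical_parcelate (region_list : List String) : List String :=
  region_list.foldl (fun surgical_labels label =>
    let label := PySem.Str.lower label
    let surgical_label :=
      if PySem.Str.isIn "emptylabel" label || PySem.Str.isIn "white" label then
        "EmptyLabel"
      else if PySem.Str.isIn "amygdala" label || PySem.Str.isIn "hippocampus" label then
        if PySem.Str.isIn "left" label then "left mesial temporal" else "right mesial temporal"
      else if PySem.Str.isIn "temporal" label || PySem.Str.isIn "fusiform" label
           || PySem.Str.isIn "entorhinal" label || PySem.Str.isIn "parahippocampal" label then
        if PySem.Str.isIn "left" label then "left temporal neocortex" else "right temporal neocortex"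
      else
        if PySem.Str.isIn "left" label then "left other neocortex" else "right other neocortex"
    surgical_labels ++ [surgical_label]) []

-- ===== PORT B =====
def pvRules : List (List String × String) :=
  [(["emptylabel", "white"], "EmptyLabel"),
   (["amygdala", "hippocampus"], "mesial temporal"),
   (["temporal", "fusiform", "entorhinal", "parahippocampal"], "temporal neocortex")]

def baseCategory (low : String) : String :=
  match pvRules.find? (fun r => r.1.any (fun k => PySem.Str.isIn k low)) with
  | some r => r.2
  | none => "other neocortex"

def surgical_parcelate_alt (region_list : List String) : List String :=
  region_list.foldl (fun out label =>
    let low := PySem.Str.lower label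
    let base := baseCategory low
    out ++ [if base == "EmptyLabel" then base
            else (if PySem.Str.isIn "left" low then "left " else "right ") ++ base]) []

-- ===== PRECONDITION & SPEC =====
def Spec_surgical_parcelate (region_list : List String) (out : List String) : Prop := out = surgical_parcelate_alt region_list
instance (region_list : List String) (out : List String) : Decidable (Spec_surgical_parcelate region_list out) := by unfold Spec_surgical_parcelate; infer_instance

-- ===== CLAIM (what is proved, stated in full; the proofs are below) =====
def Claim_equal_surgical_parcelate : Prop := ∀ (region_list : List String), Dom_surgical_parcelate region_list → Spec_surgical_parcelate region_list (surgical_parcelate region_list)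

-- ===== LEMMAS AND PROOFS =====
theorem step_eq (low : String) :
    (if PySem.Str.isIn "emptylabel" low || PySem.Str.isIn "white" low then
        "EmptyLabel"
      else if PySem.Str.isIn "amygdala" low || PySem.Str.isIn "hippocampus" low then
        if PySem.Str.isIn "left" low then "left mesial temporal" else "right mesial temporal"
      else if PySem.Str.isIn "temporal" low || PySem.Str.isIn "fusiform" low
           || PySem.Str.isIn "entorhinal" low || PySem.Str.isIn "parahippocampal" low then
        if PySem.Str.isIn "left" low then "left temporal neocortex" else "right temporal neocortex"
      else
        if PySem.Str.isIn "left" low then "left other neocortex" else "right other neocortex")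
    = (if baseCategory low == "EmptyLabel" then baseCategory low
       else (if PySem.Str.isIn "left" low then "left " else "right ") ++ baseCategory low) := by
  simp only [baseCategory, pvRules, List.find?, List.any_cons, List.any_nil, Bool.or_false]
  cases PySem.Str.isIn "emptylabel" low <;>
  cases PySem.Str.isIn "white" low <;>
  cases PySem.Str.isIn "amygdala" low <;>
  cases PySem.Str.isIn "hippocampus" low <;>
  cases PySem.Str.isIn "temporal" low <;>
  cases PySem.Str.isIn "fusiform" low <;>
  cases PySem.Str.isIn "entorhinal" low <;>
  cases PySem.Str.isIn "parahippocampal" low <;>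
  cases PySem.Str.isIn "left" low <;> rfl

theorem foldl_step (f : String → String) (l : List String) (acc : List String) :
    l.foldl (fun out label => out ++ [f label]) acc = acc ++ l.map f := by
  induction l generalizing acc with
  | nil => simp
  | cons x xs ih => simp [List.foldl_cons, ih]

-- ===== VERDICT (by name: the statement is the Claim_ definition above) =====
theorem surgical_parcelate_spec : Claim_equal_surgical_parcelate := by
  intro region_list _
  show surgical_parcelate region_list = surgical_parcelate_alt region_list
  unfold surgical_parcelate surgical_parcelate_alt
  rw [foldl_step, foldl_step]
  simp only [List.nil_append]
  apply List.map_congr_left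
  intro label _
  exact step_eq (PySem.Str.lower label)
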